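-- pv_equiv track=rewrite | github.com/microsoft/SARA | interactions/touch.py | find_max_distance
-- ===== SOURCE A (Python) =====
-- def find_max_distance(infos):
--     begin_x = infos[0]['x']
--     begin_y = infos[0]['y']
--     xlist = [info['x'] for info in infos]
--     ylist = [info['y'] for info in infos]
--     idx = 1
--     max_distance_x = 0
--     max_distance_y = 0
--     while idx < len(xlist):
--         cur_distance_x = abs(xlist[idx] - begin_x)
--         cur_distance_y = abs(ylist[idx] - begin_y)
--         max_distance_x = max(max_distance_x, cur_distance_x)
--         max_distance_y = max(max_distance_y, cur_distance_y)
--         idx += 1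
--     return max_distance_x, max_distance_y
-- ===== SOURCE B (Python) =====
-- def find_max_distance(infos):
--     begin_x = infos[0]['x']
--     begin_y = infos[0]['y']
--     xs = [info['x'] for info in infos]
--     ys = [info['y'] for info in infos]
--     return (max(max(xs) - begin_x, begin_x - min(xs)),
--             max(max(ys) - begin_y, begin_y - min(ys)))
-- ===== Notes on version B (the rewrite author's own statement) =====
-- stated objective: simpler
-- what changed: B maintains coordinate extremes (min/max of the x- and y-lists) instead of a running maximum of per-element absolute distances, using max_i |xi-b| = max(max(xs)-b, b-min(xs)); the explicit index loop and all abs() calls disappear.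
import Mathlib
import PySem

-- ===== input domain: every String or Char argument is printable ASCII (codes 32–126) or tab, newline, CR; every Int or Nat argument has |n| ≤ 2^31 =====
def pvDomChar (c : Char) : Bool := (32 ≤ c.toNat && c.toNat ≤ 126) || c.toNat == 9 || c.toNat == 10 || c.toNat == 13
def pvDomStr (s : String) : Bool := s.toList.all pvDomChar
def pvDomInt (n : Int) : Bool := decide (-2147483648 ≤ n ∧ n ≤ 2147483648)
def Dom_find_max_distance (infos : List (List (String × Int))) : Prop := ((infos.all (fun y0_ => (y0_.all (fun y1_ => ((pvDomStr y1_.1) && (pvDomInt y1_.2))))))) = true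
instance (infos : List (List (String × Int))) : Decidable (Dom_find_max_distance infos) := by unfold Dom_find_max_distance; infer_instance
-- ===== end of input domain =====

-- B computes coordinate extremes (min/max of the x- and y-lists) instead of a running max of per-element absolute distances; same O(n) cost, simpler.


-- ===== PORT A =====
-- infos[0]['x'] etc.: under Pre_ the list is nonempty and every dict has keys "x","y";
-- the .getD 0 / .headD [] defaults are never reached there (Python raises exactly on the excluded inputs).
def find_max_distance (infos : List (List (String × Int))) : Int × Int :=
  let begin_x := ((PySem.Dict.mk (infos.headD [])).get? "x").getD 0
  let begin_y := ((PySem.Dict.mk (infos.headD [])).get? "y").getD 0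
  let xlist := infos.map (fun info => ((PySem.Dict.mk info).get? "x").getD 0)
  let ylist := infos.map (fun info => ((PySem.Dict.mk info).get? "y").getD 0)
  -- while idx < len(xlist) with idx starting at 1: a fold over range(1, len(xlist))
  (PySem.List.pyRange 1 (xlist.length : Int) 1).foldl
    (fun (m : Int × Int) idx =>
      let cur_distance_x := |PySem.List.pyGetD xlist idx 0 - begin_x|
      let cur_distance_y := |PySem.List.pyGetD ylist idx 0 - begin_y|
      (max m.1 cur_distance_x, max m.2 cur_distance_y))
    (0, 0)

-- ===== PORT B =====
def find_max_distance_alt (infos : List (List (String × Int))) : Int × Int :=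
  let begin_x := ((PySem.Dict.mk (infos.headD [])).get? "x").getD 0
  let begin_y := ((PySem.Dict.mk (infos.headD [])).get? "y").getD 0
  let xs := infos.map (fun info => ((PySem.Dict.mk info).get? "x").getD 0)
  let ys := infos.map (fun info => ((PySem.Dict.mk info).get? "y").getD 0)
  (max ((PySem.List.max? xs (fun v => v)).getD 0 - begin_x)
       (begin_x - (PySem.List.min? xs (fun v => v)).getD 0),
   max ((PySem.List.max? ys (fun v => v)).getD 0 - begin_y)
       (begin_y - (PySem.List.min? ys (fun v => v)).getD 0))

-- ===== PRECONDITION & SPEC =====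
-- Pre_ excludes exactly the inputs where Python A raises: the empty list (IndexError on infos[0])
-- and any dict missing the key "x" or "y" (KeyError in the lookups/comprehensions).
def Pre_find_max_distance (infos : List (List (String × Int))) : Prop :=
  infos ≠ [] ∧ ∀ d ∈ infos,
    (PySem.Dict.mk d).contains "x" = true ∧ (PySem.Dict.mk d).contains "y" = true
instance (infos : List (List (String × Int))) : Decidable (Pre_find_max_distance infos) := by unfold Pre_find_max_distance; infer_instance

def pvWitness_find_max_distance : (List (List (String × Int))) := [[("x", 3), ("y", 4)], [("x", -1), ("y", 7)]]

def Spec_find_max_distance (infos : List (List (String × Int))) (out : Int × Int) : Prop := out = find_max_distance_alt infos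
instance (infos : List (List (String × Int))) (out : Int × Int) : Decidable (Spec_find_max_distance infos out) := by unfold Spec_find_max_distance; infer_instance

-- ===== CLAIM (what is proved, stated in full; the proofs are below) =====
def Claim_equal_find_max_distance : Prop := ∀ (infos : List (List (String × Int))), Dom_find_max_distance infos → Pre_find_max_distance infos → Spec_find_max_distance infos (find_max_distance infos)

-- ===== LEMMAS AND PROOFS =====

-- the paired running-max loop splits into two independent folds
lemma pv_fold_pair_split (r : List Int) (g1 g2 : Int → Int) :
    ∀ (init : Int × Int),
      r.foldl (fun m idx => (max m.1 (g1 idx), max m.2 (g2 idx))) init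
        = (r.foldl (fun m idx => max m (g1 idx)) init.1,
           r.foldl (fun m idx => max m (g2 idx)) init.2) := by
  induction r with
  | nil => intro init; rfl
  | cons v t ih => intro init; simpa using ih (max init.1 (g1 v), max init.2 (g2 v))

-- running max of |v - b| over t equals the extremes formula, given correct partial extremes
lemma pv_core (b : Int) : ∀ (t : List Int) (m hi lo : Int),
    m = max (hi - b) (b - lo) → b ≤ hi → lo ≤ b →
    t.foldl (fun m v => max m |v - b|) m
      = max ((t.foldl max hi) - b) (b - (t.foldl min lo)) := by
  intro t
  induction t with
  | nil => intro m hi lo hm _ _; simpa using hm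
  | cons v t ih =>
    intro m hi lo hm hhi hlo
    simp only [List.foldl_cons]
    refine ih _ (max hi v) (min lo v) ?_ (le_max_of_le_left hhi) (min_le_of_left_le hlo)
    have habs : |v - b| = max (v - b) (b - v) := by
      rcases le_total v b with h | h
      · rw [abs_of_nonpos (by omega)]; omega
      · rw [abs_of_nonneg (by omega)]; omega
    rw [habs]; omega

-- ===== VERDICT (by name: the statement is the Claim_ definition above) =====
theorem find_max_distance_spec : Claim_equal_find_max_distance := by
  intro infos _ _
  unfold Spec_find_max_distance find_max_distance find_max_distance_alt
  cases infos with
  | nil => decide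
  | cons i0 rest =>
    simp only [List.headD_cons, List.map_cons]
    set bx := ((PySem.Dict.mk i0).get? "x").getD 0 with hbx
    set by' := ((PySem.Dict.mk i0).get? "y").getD 0 with hby
    set tx := rest.map (fun info => ((PySem.Dict.mk info).get? "x").getD 0) with htx
    set ty := rest.map (fun info => ((PySem.Dict.mk info).get? "y").getD 0) with hty
    rw [pv_fold_pair_split]
    have hx : (PySem.List.pyRange 1 ((bx :: tx).length : Int) 1).foldl
        (fun m idx => max m (|PySem.List.pyGetD (bx :: tx) idx 0 - bx|)) 0
        = ((bx :: tx).drop 1).foldl (fun m v => max m (|v - bx|)) 0 := by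
      simpa using PySem.List.foldl_pyRange_pyGetD' (bx :: tx) 0
        (fun m v => max m (|v - bx|)) 0 (a := 1) (by omega)
    have hy : (PySem.List.pyRange 1 ((bx :: tx).length : Int) 1).foldl
        (fun m idx => max m (|PySem.List.pyGetD (by' :: ty) idx 0 - by'|)) 0
        = ((by' :: ty).drop 1).foldl (fun m v => max m (|v - by'|)) 0 := by
      have h2 : ((bx :: tx).length : Int) = ((by' :: ty).length : Int) := by
        simp [htx, hty]
      rw [h2]
      simpa using PySem.List.foldl_pyRange_pyGetD' (by' :: ty) 0
        (fun m v => max m (|v - by'|)) 0 (a := 1) (by omega)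
    rw [hx, hy]
    simp only [List.drop_succ_cons, List.drop_zero,
      PySem.List.max?_id_cons, PySem.List.min?_id_cons, Option.getD_some]
    rw [pv_core bx tx 0 bx bx (by simp) le_rfl le_rfl,
        pv_core by' ty 0 by' by' (by simp) le_rfl le_rfl]
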